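-- pv_equiv track=rewrite | github.com/mondas-mania/advent-of-code | 2023/Day_01/day01_part2.py | find_first_num
-- ===== SOURCE A (Python) =====
-- digit_map = {
--   "": "",
--   "zero": "0",
--   "one": "1",
--   "two": "2",
--   "three": "3",
--   "four": "4",
--   "five": "5",
--   "six": "6",
--   "seven": "7",
--   "eight": "8",
--   "nine": "9",
-- }
--
-- def find_first_num(line: str) -> str:
--   earliest_num = ""
--   for string in digit_map.keys():
--     pos = line.find(string)
--     if pos != -1 and (pos < line.find(earliest_num) or earliest_num == ""):
--       earliest_num = string
--   new_line = line.replace(earliest_num, digit_map[earliest_num])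
--   return new_line
-- ===== SOURCE B (Python) =====
-- digit_map = {
--   "": "",
--   "zero": "0",
--   "one": "1",
--   "two": "2",
--   "three": "3",
--   "four": "4",
--   "five": "5",
--   "six": "6",
--   "seven": "7",
--   "eight": "8",
--   "nine": "9",
-- }
--
-- def find_first_num(line: str) -> str:
--   # single left-to-right positional scan with early exit
--   for i in range(len(line)):
--     for word in digit_map:
--       if word and line.startswith(word, i):
--         return line.replace(word, digit_map[word])
--   return line
-- ===== Notes on version B (the rewrite author's own statement) =====
-- stated objective: alternative
-- what changed: Replaces ten whole-line .find scans plus a running minimum with a single left-to-right positional scan that tests each digit word with startswith at each index and returns at the first hit.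
import Mathlib
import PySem

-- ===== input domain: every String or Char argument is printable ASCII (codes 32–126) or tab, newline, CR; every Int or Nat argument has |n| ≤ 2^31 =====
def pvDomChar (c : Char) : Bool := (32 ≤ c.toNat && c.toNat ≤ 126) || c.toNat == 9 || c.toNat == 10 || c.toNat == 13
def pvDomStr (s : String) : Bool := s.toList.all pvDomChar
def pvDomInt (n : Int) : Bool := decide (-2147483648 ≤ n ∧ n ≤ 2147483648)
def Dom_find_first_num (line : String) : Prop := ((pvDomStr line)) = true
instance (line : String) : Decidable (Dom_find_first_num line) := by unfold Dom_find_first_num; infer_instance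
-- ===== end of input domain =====

-- B replaces A's ten whole-line .find scans and running minimum by one left-to-right
-- positional scan with startswith and early exit (objective: alternative, same cost class).

def digit_map : List (String × String) :=
  [("", ""), ("zero", "0"), ("one", "1"), ("two", "2"), ("three", "3"), ("four", "4"),
   ("five", "5"), ("six", "6"), ("seven", "7"), ("eight", "8"), ("nine", "9")]

-- ===== PORT A =====
def find_first_num (line : String) : String :=
  let earliest_num := digit_map.foldl (fun earliest_num kv =>
    let pos := PySem.Str.find line kv.1
    if pos ≠ -1 ∧ (pos < PySem.Str.find line earliest_num ∨ earliest_num = "") then kv.1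
    else earliest_num) ""
  PySem.Str.replace line earliest_num (PySem.Dict.getD (PySem.Dict.mk digit_map) earliest_num "")

-- ===== PORT B =====
-- `line.startswith(word, i)` with 0 ≤ i ≤ len(line) is exactly: word is a prefix of line[i:].
def find_first_num_alt_go (line : String) (i : Nat) : String :=
  if hlt : i < line.toList.length then
    match digit_map.find? (fun kv =>
        decide (kv.1 ≠ "") && PySem.Chars.startswith (line.toList.drop i) kv.1.toList) with
    | some kv => PySem.Str.replace line kv.1 (PySem.Dict.getD (PySem.Dict.mk digit_map) kv.1 "")
    | none => find_first_num_alt_go line (i + 1)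
  else line
termination_by line.toList.length - i
decreasing_by simp only [String.length_toList] at *; omega


def find_first_num_alt (line : String) : String := find_first_num_alt_go line 0

-- ===== PRECONDITION & SPEC =====
def Spec_find_first_num (line : String) (out : String) : Prop := out = find_first_num_alt line
instance (line : String) (out : String) : Decidable (Spec_find_first_num line out) := by unfold Spec_find_first_num; infer_instance

-- ===== CLAIM (what is proved, stated in full; the proofs are below) =====
def Claim_equal_find_first_num : Prop := ∀ (line : String), Dom_find_first_num line → Spec_find_first_num line (find_first_num line)

-- ===== LEMMAS AND PROOFS =====

-- the ten digit words, in digit_map order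
def pvWords : List String :=
  ["zero", "one", "two", "three", "four", "five", "six", "seven", "eight", "nine"]

-- A's loop body, abstracted over the current accumulator and the key
def fstep (line e w : String) : String :=
  if PySem.Str.find line w ≠ -1 ∧ (PySem.Str.find line w < PySem.Str.find line e ∨ e = "")
  then w else e

lemma fstep_empty (line : String) : fstep line "" "" = "" := by
  unfold fstep; split <;> rfl

lemma foldA (line : String) :
    digit_map.foldl (fun e kv =>
      if PySem.Str.find line kv.1 ≠ -1 ∧
         (PySem.Str.find line kv.1 < PySem.Str.find line e ∨ e = "") then kv.1 else e) ""
    = pvWords.foldl (fstep line) "" := by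
  have h : (fun (e : String) (kv : String × String) =>
      if PySem.Str.find line kv.1 ≠ -1 ∧
         (PySem.Str.find line kv.1 < PySem.Str.find line e ∨ e = "") then kv.1 else e)
      = fun e kv => fstep line e kv.1 := rfl
  rw [h]
  simp only [digit_map, pvWords, List.foldl, fstep_empty]

-- the fold keeps an occurring word of minimal find position (or "" if none occurs)
lemma fold_spec (line : String) (ws : List String) (e : String) (hw : "" ∉ ws) :
    (ws.foldl (fstep line) e = e ∧
      ∀ w ∈ ws, PySem.Str.find line w ≠ -1 →
        (e ≠ "" ∧ PySem.Str.find line e ≤ PySem.Str.find line w))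
    ∨ (ws.foldl (fstep line) e ∈ ws ∧
       PySem.Str.find line (ws.foldl (fstep line) e) ≠ -1 ∧
       ws.foldl (fstep line) e ≠ "" ∧
       (e = "" ∨ PySem.Str.find line (ws.foldl (fstep line) e) ≤ PySem.Str.find line e) ∧
       ∀ w ∈ ws, PySem.Str.find line w ≠ -1 →
         PySem.Str.find line (ws.foldl (fstep line) e) ≤ PySem.Str.find line w) := by
  induction ws generalizing e with
  | nil => exact Or.inl ⟨rfl, by simp⟩
  | cons w ws ih =>
    have hw' : "" ∉ ws := fun h => hw (List.mem_cons_of_mem _ h)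
    have hwne : w ≠ "" := fun h => hw (h ▸ List.mem_cons_self ..)
    by_cases hc : PySem.Str.find line w ≠ -1 ∧
        (PySem.Str.find line w < PySem.Str.find line e ∨ e = "")
    · have hstep : fstep line e w = w := by unfold fstep; exact if_pos hc
      have hfold : (w :: ws).foldl (fstep line) e = ws.foldl (fstep line) w := by
        simp [List.foldl, hstep]
      rcases ih w hw' with ⟨h1, h2⟩ | ⟨h1, h2, h3, h4, h5⟩
      · refine Or.inr ⟨?_, ?_, ?_, ?_, ?_⟩
        · rw [hfold, h1]; exact List.mem_cons_self ..
        · rw [hfold, h1]; exact hc.1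
        · rw [hfold, h1]; exact hwne
        · rw [hfold, h1]
          rcases hc.2 with h | h
          · exact Or.inr (le_of_lt h)
          · exact Or.inl h
        · intro w' hw'' hocc
          rw [hfold, h1]
          rcases List.mem_cons.mp hw'' with rfl | hmem
          · exact le_refl _
          · exact (h2 w' hmem hocc).2
      · refine Or.inr ⟨?_, ?_, ?_, ?_, ?_⟩
        · rw [hfold]; exact List.mem_cons_of_mem _ h1
        · rw [hfold]; exact h2
        · rw [hfold]; exact h3
        · rw [hfold]
          have hrw : PySem.Str.find line (ws.foldl (fstep line) w) ≤ PySem.Str.find line w := by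
            rcases h4 with h | h
            · exact absurd h hwne
            · exact h
          rcases hc.2 with h | h
          · exact Or.inr (le_of_lt (lt_of_le_of_lt hrw h))
          · exact Or.inl h
        · intro w' hw'' hocc
          rw [hfold]
          rcases List.mem_cons.mp hw'' with rfl | hmem
          · rcases h4 with h | h
            · exact absurd h hwne
            · exact h
          · exact h5 w' hmem hocc
    · have hstep : fstep line e w = e := by unfold fstep; exact if_neg hc
      have hfold : (w :: ws).foldl (fstep line) e = ws.foldl (fstep line) e := by
        simp [List.foldl, hstep]
      have hcw : PySem.Str.find line w ≠ -1 →
          (e ≠ "" ∧ PySem.Str.find line e ≤ PySem.Str.find line w) := by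
        intro hocc
        by_cases he : e = ""
        · exact absurd ⟨hocc, Or.inr he⟩ hc
        · refine ⟨he, ?_⟩
          by_contra hlt
          exact hc ⟨hocc, Or.inl (by omega)⟩
      rcases ih e hw' with ⟨h1, h2⟩ | ⟨h1, h2, h3, h4, h5⟩
      · refine Or.inl ⟨by rw [hfold, h1], ?_⟩
        intro w' hw'' hocc
        rcases List.mem_cons.mp hw'' with rfl | hmem
        · exact hcw hocc
        · exact h2 w' hmem hocc
      · refine Or.inr ⟨?_, ?_, ?_, ?_, ?_⟩
        · rw [hfold]; exact List.mem_cons_of_mem _ h1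
        · rw [hfold]; exact h2
        · rw [hfold]; exact h3
        · rw [hfold]; exact h4
        · intro w' hw'' hocc
          rw [hfold]
          rcases List.mem_cons.mp hw'' with rfl | hmem
          · rcases hcw hocc with ⟨hne, hle⟩
            rcases h4 with h | h
            · exact absurd h hne
            · exact le_trans h hle
          · exact h5 w' hmem hocc

-- a prefix of line[i:] occurs in line, and its first occurrence is at or before i
lemma startswith_occ (l : List Char) (w : String) (i : Nat)
    (h : w.toList <+: l.drop i) :
    PySem.Chars.find l w.toList ≠ -1 ∧ (PySem.Chars.find l w.toList).toNat ≤ i := by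
  have hocc : PySem.Chars.find l w.toList ≠ -1 := by
    rw [PySem.Chars.find_ne_neg_one_iff]
    rw [← PySem.Chars.isIn_iff_infix, ← PySem.Chars.exists_prefix_drop_iff_isIn]
    exact ⟨i, h⟩
  refine ⟨hocc, ?_⟩
  have hnn : 0 ≤ PySem.Chars.find l w.toList := by
    have := PySem.Chars.neg_one_le_find l w.toList
    omega
  rcases PySem.Chars.find_spec hnn with ⟨_, hmin⟩
  by_contra hgt
  exact hmin i (by omega) h

-- no digit word is a prefix of another (finite check)
lemma words_no_prefix : ∀ w1 ∈ pvWords, ∀ w2 ∈ pvWords,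
    w1.toList <+: w2.toList → w1 = w2 := by decide

-- two digit words starting at the same place are equal
lemma words_clash (w1 : String) (h1 : w1 ∈ pvWords) (w2 : String) (h2 : w2 ∈ pvWords)
    (t : List Char) (p1 : w1.toList <+: t) (p2 : w2.toList <+: t) : w1 = w2 := by
  rcases le_total w1.toList.length w2.toList.length with h | h
  · exact words_no_prefix w1 h1 w2 h2 (List.prefix_of_prefix_length_le p1 p2 h)
  · exact (words_no_prefix w2 h2 w1 h1 (List.prefix_of_prefix_length_le p2 p1 h)).symm

-- digit_map's keys are "" plus pvWords (finite checks)
lemma dm_keys : ∀ kv ∈ digit_map, kv.1 = "" ∨ kv.1 ∈ pvWords := by decide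
lemma dm_entry : ∀ w ∈ pvWords, (w, PySem.Dict.getD (PySem.Dict.mk digit_map) w "") ∈ digit_map := by decide

-- loop exit past the end
lemma go_ge (line : String) (i : Nat) (h : line.toList.length ≤ i) :
    find_first_num_alt_go line i = line := by
  rw [find_first_num_alt_go.eq_def]
  rw [dif_neg (by omega)]

lemma go_step_none (line : String) (i : Nat)
    (h : digit_map.find? (fun kv =>
        decide (kv.1 ≠ "") && PySem.Chars.startswith (line.toList.drop i) kv.1.toList) = none) :
    find_first_num_alt_go line i = find_first_num_alt_go line (i + 1) := by
  by_cases hlt : i < line.toList.length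
  · conv_lhs => rw [find_first_num_alt_go.eq_def]
    rw [dif_pos hlt, h]
  · rw [go_ge line i (by omega), go_ge line (i + 1) (by omega)]

lemma find?_none (line : String) (i : Nat)
    (h : ∀ w ∈ pvWords, PySem.Chars.find line.toList w.toList ≠ -1 →
          i < (PySem.Chars.find line.toList w.toList).toNat) :
    digit_map.find? (fun kv =>
        decide (kv.1 ≠ "") && PySem.Chars.startswith (line.toList.drop i) kv.1.toList) = none := by
  rw [List.find?_eq_none]
  intro kv hkv
  rcases dm_keys kv hkv with hk | hk
  · simp [hk]
  · intro hp
    simp only [Bool.and_eq_true, decide_eq_true_eq, PySem.Chars.startswith_iff] at hp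
    rcases startswith_occ line.toList kv.1 i hp.2 with ⟨hocc, hle⟩
    exact absurd (h kv.1 hk hocc) (by omega)

lemma go_skip (line : String) (n i : Nat)
    (h : ∀ j, i ≤ j → j < i + n →
      digit_map.find? (fun kv =>
        decide (kv.1 ≠ "") && PySem.Chars.startswith (line.toList.drop j) kv.1.toList) = none) :
    find_first_num_alt_go line i = find_first_num_alt_go line (i + n) := by
  induction n generalizing i with
  | zero => rfl
  | succ n ih =>
    rw [go_step_none line i (h i (le_refl i) (by omega))]
    have := ih (i + 1) (fun j hj1 hj2 => h j (by omega) (by omega))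
    rw [this]
    congr 1
    omega

lemma toList_ne_nil (w : String) (h : w ≠ "") : w.toList ≠ [] := by
  simpa using h

-- ===== VERDICT (by name: the statement is the Claim_ definition above) =====
theorem find_first_num_spec : Claim_equal_find_first_num := by
  intro line _
  unfold Spec_find_first_num find_first_num find_first_num_alt
  rw [foldA]
  set c := pvWords.foldl (fstep line) "" with hc
  have hw : "" ∉ pvWords := by decide
  rcases fold_spec line pvWords "" hw with ⟨h1, h2⟩ | ⟨h1, h2, h3, _, h5⟩
  · -- no digit word occurs: both sides are line
    rw [← hc] at h1
    rw [h1]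
    have hnone : ∀ w ∈ pvWords, PySem.Str.find line w = -1 := by
      intro w hw'
      by_contra hne
      exact absurd ((h2 w hw' hne).1) (by simp)
    have hAll : ∀ i, digit_map.find? (fun kv =>
        decide (kv.1 ≠ "") && PySem.Chars.startswith (line.toList.drop i) kv.1.toList) = none := by
      intro i
      apply find?_none
      intro w hw' hocc
      exact absurd (by simpa [PySem.Str.find_eq] using hnone w hw') hocc
    have hB : find_first_num_alt_go line 0 = line := by
      rw [go_skip line line.toList.length 0 (fun j _ _ => hAll j)]
      exact go_ge line (0 + line.toList.length) (by omega)
    rw [hB]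
    show PySem.Str.replace line "" (PySem.Dict.getD (PySem.Dict.mk digit_map) "" "") = line
    have : PySem.Dict.getD (PySem.Dict.mk digit_map) "" "" = "" := by decide
    rw [this]
    show String.ofList (PySem.Chars.replace line.toList [] []) = line
    have hrep : PySem.Chars.replace line.toList [] [] = line.toList := by
      simp only [PySem.Chars.replace, List.isEmpty_nil, if_pos, List.nil_append]
      induction line.toList with
      | nil => rfl
      | cons a l ihl => simp [List.flatMap_cons, ihl]
    rw [hrep]; simp
  · -- some word occurs; c is an occurring word of minimal find position
    rw [← hc] at h1 h2 h3 h5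
    have hcfind : PySem.Chars.find line.toList c.toList ≠ -1 := by
      simpa [PySem.Str.find_eq] using h2
    have hnn : 0 ≤ PySem.Chars.find line.toList c.toList := by
      have := PySem.Chars.neg_one_le_find line.toList c.toList
      omega
    set i0 := (PySem.Chars.find line.toList c.toList).toNat with hi0
    rcases PySem.Chars.find_spec hnn with ⟨hpre, _⟩
    rw [← hi0] at hpre
    have hi0lt : i0 < line.toList.length := by
      by_contra hge
      have : line.toList.drop i0 = [] := List.drop_eq_nil_iff.mpr (by omega)
      rw [this] at hpre
      exact toList_ne_nil c h3 (List.prefix_nil.mp hpre)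
    -- before i0 no word starts
    have hskip : find_first_num_alt_go line 0 = find_first_num_alt_go line i0 := by
      have := go_skip line i0 0 (fun j _ hj => by
        apply find?_none
        intro w hw' hocc
        have hmin : PySem.Chars.find line.toList c.toList ≤
            PySem.Chars.find line.toList w.toList := by
          have := h5 w hw' (by simpa [PySem.Str.find_eq] using hocc)
          simpa [PySem.Str.find_eq] using this
        have hwnn : 0 ≤ PySem.Chars.find line.toList w.toList := by
          have := PySem.Chars.neg_one_le_find line.toList w.toList
          omega
        omega)
      simpa using this
    -- at i0 the scan finds exactly c
    have hpredc : ∃ kv ∈ digit_map,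
        (decide (kv.1 ≠ "") && PySem.Chars.startswith (line.toList.drop i0) kv.1.toList) = true := by
      exact ⟨(c, PySem.Dict.getD (PySem.Dict.mk digit_map) c ""), dm_entry c h1, by
        simp only [Bool.and_eq_true, decide_eq_true_eq, PySem.Chars.startswith_iff]
        exact ⟨h3, hpre⟩⟩
    rcases Option.isSome_iff_exists.mp (List.find?_isSome.mpr hpredc) with ⟨kv, hkv⟩
    have hkvp := List.find?_some hkv
    have hkvm := List.mem_of_find?_eq_some hkv
    simp only [Bool.and_eq_true, decide_eq_true_eq, PySem.Chars.startswith_iff] at hkvp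
    have hkvw : kv.1 ∈ pvWords := by
      rcases dm_keys kv hkvm with h | h
      · exact absurd h hkvp.1
      · exact h
    have hkey : kv.1 = c := words_clash kv.1 hkvw c h1 (line.toList.drop i0) hkvp.2 hpre
    rw [hskip]
    conv_rhs => rw [find_first_num_alt_go.eq_def]
    rw [dif_pos hi0lt, hkv]
    show PySem.Str.replace line c (PySem.Dict.getD (PySem.Dict.mk digit_map) c "") =
      PySem.Str.replace line kv.1 (PySem.Dict.getD (PySem.Dict.mk digit_map) kv.1 "")
    rw [hkey]
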